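-- pv_equiv track=rewrite | github.com/miliar/Code_Jam_Webscraper | solutions_python/Problem_135/1695.py | calculateCase
-- ===== SOURCE A (Python) =====
-- def calculateCase(case):
-- 	row1 = case[0]
-- 	row2 = case[1]
-- 	nSame = 0
-- 	sameNumber = 0
-- 	for i in row1:
-- 		for j in row2:
-- 			if i == j:
-- 				nSame += 1
-- 				sameNumber = i
-- 	result = ""
-- 	if nSame == 1:
-- 		result = str(sameNumber)
-- 	elif nSame == 0:
-- 		result = "Volunteer cheated!"
-- 	else:
-- 		result = "Bad magician!"
-- 	return result
-- ===== SOURCE B (Python) =====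
-- def calculateCase(case):
--     row1, row2 = case[0], case[1]
--     common = [v for v in dict.fromkeys(row1) if v in row2]
--     nSame = sum(row1.count(v) * row2.count(v) for v in common)
--     if nSame == 1:
--         return str(common[0])
--     if nSame == 0:
--         return "Volunteer cheated!"
--     return "Bad magician!"
-- ===== Notes on version B (the rewrite author's own statement) =====
-- stated objective: simpler
-- what changed: Instead of A's nested occurrence-by-occurrence scan with a running tally and last-match variable, B enumerates the DISTINCT common values (ordered dedup of row1 intersected with row2) and computes nSame as the sum of count products row1.count(v)*row2.count(v) per distinct value, reading the answer value from that intersection list.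
import Mathlib
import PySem

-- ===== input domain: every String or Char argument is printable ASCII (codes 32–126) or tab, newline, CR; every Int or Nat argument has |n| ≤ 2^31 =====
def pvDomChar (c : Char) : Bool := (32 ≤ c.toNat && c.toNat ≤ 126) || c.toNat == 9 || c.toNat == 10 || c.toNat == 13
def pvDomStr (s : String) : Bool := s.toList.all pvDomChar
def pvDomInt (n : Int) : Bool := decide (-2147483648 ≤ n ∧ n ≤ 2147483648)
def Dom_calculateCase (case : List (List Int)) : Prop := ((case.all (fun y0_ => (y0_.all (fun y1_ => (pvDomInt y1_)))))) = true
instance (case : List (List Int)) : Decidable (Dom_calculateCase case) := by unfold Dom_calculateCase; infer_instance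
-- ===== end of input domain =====

-- B replaces A's nested occurrence-by-occurrence tally by enumerating the distinct common values (ordered dedup of row1 intersected with row2) and summing products of counts (objective: simpler).

-- ===== PORT A =====
def calculateCase (case : List (List Int)) : String :=
  match PySem.List.pyGet? case 0, PySem.List.pyGet? case 1 with
  | some row1, some row2 =>
    let st := row1.foldl (fun (p : Int × Int) i =>
        row2.foldl (fun (q : Int × Int) j => if i == j then (q.1 + 1, i) else q) p) (0, 0)
    if st.1 == 1 then PySem.Int.toStr st.2
    else if st.1 == 0 then "Volunteer cheated!"
    else "Bad magician!"
  | _, _ => ""   -- IndexError; excluded by Pre_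

-- ===== PORT B =====
def calculateCase_alt (case : List (List Int)) : String :=
  match PySem.List.pyGet? case 0 with
  | none => ""   -- IndexError; excluded by Pre_
  | some row1 =>
  match PySem.List.pyGet? case 1 with
  | none => ""   -- IndexError; excluded by Pre_
  | some row2 =>
    let common := (PySem.List.dedup row1).filter (fun v => row2.contains v)
    let nSame : Int := (common.map (fun v => (row1.count v : Int) * (row2.count v : Int))).sum
    if nSame == 1 then
      match PySem.List.pyGet? common 0 with   -- common[0]; nSame == 1 forces common ≠ []
      | some v => PySem.Int.toStr v
      | none => ""
    else if nSame == 0 then "Volunteer cheated!"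
    else "Bad magician!"

-- ===== PRECONDITION & SPEC =====
-- A raises IndexError when case has fewer than two rows; Pre_ excludes exactly those inputs.
def Pre_calculateCase (case : List (List Int)) : Prop := 2 ≤ case.length
instance (case : List (List Int)) : Decidable (Pre_calculateCase case) := by unfold Pre_calculateCase; infer_instance
def pvWitness_calculateCase : List (List Int) := [[1, 2], [2, 3]]
def Spec_calculateCase (case : List (List Int)) (out : String) : Prop := out = calculateCase_alt case
instance (case : List (List Int)) (out : String) : Decidable (Spec_calculateCase case out) := by unfold Spec_calculateCase; infer_instance

-- ===== CLAIM (what is proved, stated in full; the proofs are below) =====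
def Claim_equal_calculateCase : Prop := ∀ (case : List (List Int)), Dom_calculateCase case → Pre_calculateCase case → Spec_calculateCase case (calculateCase case)

-- ===== LEMMAS AND PROOFS =====

-- A's inner loop over row2 from state p adds the multiplicity of i and updates sameNumber iff there is a match.
theorem pv_inner (row2 : List Int) (i : Int) (p : Int × Int) :
    row2.foldl (fun (q : Int × Int) j => if i == j then (q.1 + 1, i) else q) p
      = (p.1 + row2.count i, if row2.count i ≠ 0 then i else p.2) := by
  induction row2 generalizing p with
  | nil => simp
  | cons j t ih =>
    simp only [List.foldl_cons, List.count_cons, ih]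
    by_cases h : i = j
    · subst h; simp; omega
    · have h' : (j == i) = false := by simp [Ne.symm h]
      simp [h, h', beq_iff_eq]

-- A's whole loop: first component sums the multiplicities, second is the last row1 element present in row2.
theorem pv_state (row2 : List Int) : ∀ (row1 : List Int) (p : Int × Int),
    row1.foldl (fun (p : Int × Int) i =>
        row2.foldl (fun (q : Int × Int) j => if i == j then (q.1 + 1, i) else q) p) p
      = (p.1 + (row1.map (fun i => (row2.count i : Int))).sum,
         (row1.filter (fun i => row2.contains i)).getLastD p.2) := by
  intro row1
  induction row1 with
  | nil => intro p; simp
  | cons a t ih =>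
    intro p
    rw [List.foldl_cons, pv_inner, ih]
    by_cases h : a ∈ row2
    · have hc : row2.count a ≠ 0 := by
        simpa [Nat.pos_iff_ne_zero] using List.count_pos_iff.mpr h
      have hb : (fun i => row2.contains i) a = true := by simpa using h
      rw [if_pos hc, List.filter_cons_of_pos hb, List.getLastD_cons,
          List.map_cons, List.sum_cons, add_assoc]
    · have hc : row2.count a = 0 := by simpa using List.count_eq_zero.mpr h
      have hb : ¬ (fun i => row2.contains i) a = true := by simpa using h
      rw [if_neg (by simp [hc]), List.filter_cons_of_neg hb, List.map_cons, List.sum_cons,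
          add_assoc]

theorem pv_sum_single (g : Int → Int) : ∀ (D : List Int), D.Nodup → ∀ a ∈ D,
    (D.map (fun v => if a = v then g v else 0)).sum = g a := by
  intro D
  induction D with
  | nil => simp
  | cons b t ih =>
    intro hnd a ha
    rcases List.nodup_cons.mp hnd with ⟨hbt, hnt⟩
    rcases List.mem_cons.mp ha with h | h
    · subst h
      have : (t.map (fun v => if a = v then g v else 0)) = t.map (fun _ => 0) := by
        apply List.map_congr_left; intro x hx
        have : a ≠ x := fun e => hbt (e ▸ hx)
        simp [this]
      simp [this]
    · have hab : a ≠ b := fun e => (List.nodup_cons.mp hnd).1 (e ▸ h)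
      simp [hab, ih hnt a h]

theorem pv_sum_counts (g : Int → Int) (D : List Int) (hD : D.Nodup) :
    ∀ (l1 : List Int), (∀ x ∈ l1, x ∈ D) →
      (l1.map g).sum = (D.map (fun v => (l1.count v : Int) * g v)).sum := by
  intro l1
  induction l1 with
  | nil => simp
  | cons a t ih =>
    intro hsub
    have ha : a ∈ D := hsub a (List.mem_cons_self)
    have ht : ∀ x ∈ t, x ∈ D := fun x hx => hsub x (List.mem_cons_of_mem _ hx)
    have hsplit : (D.map (fun v => ((a :: t).count v : Int) * g v)).sum
        = (D.map (fun v => (t.count v : Int) * g v)).sum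
          + (D.map (fun v => if a = v then g v else 0)).sum := by
      rw [← List.sum_map_add]
      apply congrArg
      apply List.map_congr_left
      intro v _
      by_cases h : v = a
      · subst h; simp; ring
      · have h1 : ¬ a = v := fun e => h e.symm
        simp [h1]
    simp only [List.map_cons, List.sum_cons, hsplit, ih ht, pv_sum_single g D hD a ha]
    ring

theorem pv_sum_filter (g : Int → Int) (q : Int → Bool)
    (hz : ∀ v, q v = false → g v = 0) : ∀ (D : List Int),
    ((D.filter q).map g).sum = (D.map g).sum := by
  intro D
  induction D with
  | nil => simp
  | cons b t ih =>
    by_cases h : q b = true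
    · simp [h, ih]
    · have h' : q b = false := by simpa using h
      simp [h', ih, hz b h']

-- a list of integers each ≥ 1 whose sum is 1 is a singleton
theorem pv_len_le_sum (t : Int → Int) : ∀ (l : List Int), (∀ v ∈ l, 1 ≤ t v) →
    (l.length : Int) ≤ (l.map t).sum := by
  intro l
  induction l with
  | nil => simp
  | cons a s ih =>
    intro h
    have h1 := h a (List.mem_cons_self)
    have h2 := ih (fun v hv => h v (List.mem_cons_of_mem _ hv))
    simp only [List.map_cons, List.sum_cons, List.length_cons]
    push_cast
    omega

theorem pv_sum_one (t : Int → Int) : ∀ (l : List Int), (∀ v ∈ l, 1 ≤ t v) →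
    (l.map t).sum = 1 → ∃ w, l = [w] := by
  intro l
  cases l with
  | nil => intro _ h; simp at h
  | cons a s =>
    intro hge hsum
    cases s with
    | nil => exact ⟨a, rfl⟩
    | cons b u =>
      exfalso
      have := pv_len_le_sum t (a :: b :: u) hge
      rw [hsum] at this
      simp at this
      omega

theorem pv_getLastD_all_eq : ∀ (l : List Int) (w d : Int), l ≠ [] → (∀ x ∈ l, x = w) →
    l.getLastD d = w := by
  intro l
  induction l with
  | nil => intro w d h; exact absurd rfl h
  | cons a s ih =>
    intro w d _ hall
    cases s with
    | nil => simpa using hall a (List.mem_cons_self)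
    | cons b u =>
      rw [List.getLastD_cons]
      exact ih w a (by simp) (fun x hx => hall x (List.mem_cons_of_mem _ hx))

-- ===== VERDICT (by name: the statement is the Claim_ definition above) =====
theorem calculateCase_spec : Claim_equal_calculateCase := by
  intro case _ _
  unfold Spec_calculateCase calculateCase calculateCase_alt
  cases h0 : PySem.List.pyGet? case 0 with
  | none => rfl
  | some row1 =>
    cases h1 : PySem.List.pyGet? case 1 with
    | none => rfl
    | some row2 =>
      simp only [pv_state, zero_add]
      set common := (PySem.List.dedup row1).filter (fun v => row2.contains v) with hcom
      have hmemD : ∀ x ∈ row1, x ∈ PySem.List.dedup row1 := by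
        intro x hx; exact (PySem.List.mem_dedup row1 x).mpr hx
      have hsum : (row1.map (fun i => (row2.count i : Int))).sum
          = (common.map (fun v => (row1.count v : Int) * (row2.count v : Int))).sum := by
        rw [pv_sum_counts (fun i => (row2.count i : Int)) (PySem.List.dedup row1)
              (PySem.List.nodup_dedup row1) row1 hmemD]
        rw [← pv_sum_filter (fun v => (row1.count v : Int) * (row2.count v : Int))
              (fun v => row2.contains v) ?_ (PySem.List.dedup row1)]
        intro v hq
        have : v ∉ row2 := by simpa using hq
        simp [List.count_eq_zero.mpr this]
      rw [hsum]
      set S := (common.map (fun v => (row1.count v : Int) * (row2.count v : Int))).sum with hS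
      by_cases hone : S = 1
      · have hge : ∀ v ∈ common, 1 ≤ (row1.count v : Int) * (row2.count v : Int) := by
          intro v hv
          rw [hcom] at hv
          rcases List.mem_filter.mp hv with ⟨hvd, hvc⟩
          have hv1 : v ∈ row1 := (PySem.List.mem_dedup row1 v).mp hvd
          have hv2 : v ∈ row2 := by simpa using hvc
          have c1 : 1 ≤ row1.count v := List.count_pos_iff.mpr hv1
          have c2 : 1 ≤ row2.count v := List.count_pos_iff.mpr hv2
          have : 1 ≤ row1.count v * row2.count v := Nat.one_le_iff_ne_zero.mpr
            (Nat.mul_ne_zero (by omega) (by omega))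
          exact_mod_cast this
        obtain ⟨w, hw⟩ := pv_sum_one _ common hge (hS ▸ hone)
        have hwmem : w ∈ common := by rw [hw]; exact List.mem_cons_self
        rcases List.mem_filter.mp (hcom ▸ hwmem) with ⟨hwd, hwc⟩
        have hw1 : w ∈ row1 := (PySem.List.mem_dedup row1 w).mp hwd
        have hfa : ∀ x ∈ row1.filter (fun i => row2.contains i), x = w := by
          intro x hx
          rcases List.mem_filter.mp hx with ⟨hx1, hxc⟩
          have hxcom : x ∈ common := by
            rw [hcom]; exact List.mem_filter.mpr ⟨hmemD x hx1, hxc⟩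
          rw [hw] at hxcom
          simpa using hxcom
        have hne : row1.filter (fun i => row2.contains i) ≠ [] := by
          intro he
          have : w ∈ row1.filter (fun i => row2.contains i) :=
            List.mem_filter.mpr ⟨hw1, hwc⟩
          rw [he] at this; simp at this
        have hlast : (row1.filter (fun i => row2.contains i)).getLastD 0 = w :=
          pv_getLastD_all_eq _ w 0 hne hfa
        have hget : PySem.List.pyGet? common 0 = some w := by
          rw [hw]; rfl
        have hb1 : (S == 1) = true := by simp [hone]
        rw [if_pos hb1, if_pos hb1, hlast, hget]
      · have hb : (S == 1) = false := by simpa using hone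
        simp [hb]
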